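-- pv_equiv track=rewrite | github.com/coreyduffy/advent-of-code-2024-python | day4/challenge_one.py | get_number_of_words_found_from_position
-- ===== SOURCE A (Python) =====
-- from typing import List
--
-- DIRECTIONS_TO_SEARCH = [(0, 1), (1, 1), (1, 0), (1, -1), (0, -1), (-1, -1), (-1, 0), (-1, 1)]
--
-- def get_number_of_words_found_from_position(wordsearch_rows: List[List[str]], row_index: int, column_index: int,
--                                             num_of_rows: int, num_of_columns: int, word_to_find: str) -> int:
--     if word_to_find[0] != wordsearch_rows[row_index][column_index]:
--         return 0
--
--     word_length = len(word_to_find)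
--     number_found_from_position = 0
--
--     for direction in DIRECTIONS_TO_SEARCH:
--         count = 1
--         x, y = column_index, row_index
--         while count < word_length:
--             current_x = x + direction[1]
--             current_y = y + direction[0]
--             if current_y < 0 or current_y >= num_of_rows or current_x < 0 or current_x >= num_of_columns:
--                 break
--             if wordsearch_rows[current_y][current_x] != word_to_find[count]:
--                 break
--
--             count += 1
--             x = current_x
--             y = current_y
--
--         if count == word_length:
--             number_found_from_position += 1
--
--     return number_found_from_position
-- ===== SOURCE B (Python) =====
-- DIRECTIONS_TO_SEARCH = [(0, 1), (1, 1), (1, 0), (1, -1), (0, -1), (-1, -1), (-1, 0), (-1, 1)]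
--
-- def get_number_of_words_found_from_position(wordsearch_rows, row_index, column_index,
--                                             num_of_rows, num_of_columns, word_to_find):
--     if word_to_find[0] != wordsearch_rows[row_index][column_index]:
--         return 0
--     word_length = len(word_to_find)
--     # Stage 1: materialize, for each direction, the ray of cells clipped at the declared
--     # bounds (no matching is done here).
--     rays = []
--     for dr, dc in DIRECTIONS_TO_SEARCH:
--         cells = []
--         for i in range(1, word_length):
--             y, x = row_index + dr * i, column_index + dc * i
--             if y < 0 or y >= num_of_rows or x < 0 or x >= num_of_columns:
--                 break
--             cells.append(wordsearch_rows[y][x])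
--         rays.append(cells)
--     # Stage 2: a ray spells the word exactly when it equals the word's tail as a cell list.
--     return rays.count(list(word_to_find[1:]))
-- ===== Notes on version B (the rewrite author's own statement) =====
-- stated objective: alternative
-- what changed: A walks each direction character by character with mutable (count, x, y) state, matching and breaking on the first mismatch; B is generate-then-test: it first materializes the 8 rays of cells (clipped only at the declared bounds, with closed-form index arithmetic, never stopping at a mismatch) and then counts with list.count how many rays equal the word's tail as a whole list - per-character matching disappears in favour of one whole-sequence equality per direction.
-- outside the precondition, e.g. on get_number_of_words_found_from_position([['A', 'B', 'C']], 0, 0, 1, 4, 'AXZW'): A returns 0, B raises IndexError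
import Mathlib
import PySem

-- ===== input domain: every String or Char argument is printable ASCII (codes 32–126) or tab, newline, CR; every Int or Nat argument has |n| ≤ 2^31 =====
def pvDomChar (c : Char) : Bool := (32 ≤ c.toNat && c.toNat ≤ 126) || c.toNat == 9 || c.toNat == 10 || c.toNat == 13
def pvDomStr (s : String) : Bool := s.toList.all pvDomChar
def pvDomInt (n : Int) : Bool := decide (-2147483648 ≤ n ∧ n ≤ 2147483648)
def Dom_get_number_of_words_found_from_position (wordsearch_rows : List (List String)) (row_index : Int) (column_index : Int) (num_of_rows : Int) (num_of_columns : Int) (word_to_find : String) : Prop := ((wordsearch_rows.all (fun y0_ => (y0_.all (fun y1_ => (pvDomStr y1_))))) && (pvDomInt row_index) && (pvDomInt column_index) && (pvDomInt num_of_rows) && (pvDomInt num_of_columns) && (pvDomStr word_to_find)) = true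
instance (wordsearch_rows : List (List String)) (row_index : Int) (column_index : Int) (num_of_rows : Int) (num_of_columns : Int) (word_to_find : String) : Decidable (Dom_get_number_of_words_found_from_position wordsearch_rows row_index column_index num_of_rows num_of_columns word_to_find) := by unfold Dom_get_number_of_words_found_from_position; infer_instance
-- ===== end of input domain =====

-- B replaces A's per-direction character-matching walk (mutable count/x/y, break on mismatch)
-- by generate-then-test: it materializes the 8 rays of cells clipped only at the declared
-- bounds, then counts how many rays equal the word's tail by one whole-list equality
-- (objective: alternative decomposition, same cost).


-- ===== PORT A =====
-- the module constant DIRECTIONS_TO_SEARCH (shared by both Pythons)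
def pvDirs : List (Int × Int) := [(0, 1), (1, 1), (1, 0), (1, -1), (0, -1), (-1, -1), (-1, 0), (-1, 1)]

-- grid cell access wordsearch_rows[y][x]; at every use site the Python has already checked
-- 0 ≤ y < num_of_rows and 0 ≤ x < num_of_columns, so under Pre_ the defaults are never read
def pvCell (rows : List (List String)) (y x : Int) : String :=
  PySem.List.pyGetD (PySem.List.pyGetD rows y []) x ""

-- A's inner while loop: walks one direction maintaining (count, x, y); returns the final count
def pvWalkA (rows : List (List String)) (nr nc : Int) (w : List Char) (dir : Int × Int) :
    Nat → Int → Int → Nat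
  | count, x, y =>
    if h : count < w.length then
      let cx := x + dir.2
      let cy := y + dir.1
      if cy < 0 ∨ nr ≤ cy ∨ cx < 0 ∨ nc ≤ cx then count
      else if pvCell rows cy cx ≠ String.ofList [w.getD count ' '] then count
      else pvWalkA rows nr nc w dir (count + 1) cx cy
    else count
termination_by count _ _ => w.length - count
decreasing_by omega

def get_number_of_words_found_from_position (wordsearch_rows : List (List String)) (row_index : Int) (column_index : Int) (num_of_rows : Int) (num_of_columns : Int) (word_to_find : String) : Int :=
  match word_to_find.toList with
  | [] => 0      -- Python raises IndexError on word_to_find[0]; outside Pre_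
  | c0 :: _ =>
    match PySem.List.pyGet? wordsearch_rows row_index with
    | none => 0  -- IndexError; outside Pre_
    | some row =>
      match PySem.List.pyGet? row column_index with
      | none => 0  -- IndexError; outside Pre_
      | some cell =>
        if String.ofList [c0] ≠ cell then 0
        else
          pvDirs.foldl (fun acc dir =>
            if pvWalkA wordsearch_rows num_of_rows num_of_columns word_to_find.toList dir
                 1 column_index row_index = word_to_find.toList.length
            then acc + 1 else acc) 0

-- ===== PORT B =====
-- B's stage 1 for one direction: the ray of cells (row_index+dr*i, column_index+dc*i),
-- i = 1 .. word_length-1, clipped at the first cell outside the declared bounds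
def pvRayB (rows : List (List String)) (nr nc r c : Int) (dir : Int × Int) (L : Nat) :
    Nat → List String
  | i =>
    if h : i < L then
      let y := r + dir.1 * (i : Int)
      let x := c + dir.2 * (i : Int)
      if y < 0 ∨ nr ≤ y ∨ x < 0 ∨ nc ≤ x then []
      else pvCell rows y x :: pvRayB rows nr nc r c dir L (i + 1)
    else []
termination_by i => L - i
decreasing_by omega

def get_number_of_words_found_from_position_alt (wordsearch_rows : List (List String)) (row_index : Int) (column_index : Int) (num_of_rows : Int) (num_of_columns : Int) (word_to_find : String) : Int :=
  match word_to_find.toList with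
  | [] => 0      -- Python raises IndexError on word_to_find[0]; outside Pre_
  | c0 :: cs =>
    match PySem.List.pyGet? wordsearch_rows row_index with
    | none => 0  -- IndexError; outside Pre_
    | some row =>
      match PySem.List.pyGet? row column_index with
      | none => 0  -- IndexError; outside Pre_
      | some cell =>
        if String.ofList [c0] ≠ cell then 0
        else
          -- stage 1: rays = [cells along each of the 8 directions]
          let rays := pvDirs.map (fun dir =>
            pvRayB wordsearch_rows num_of_rows num_of_columns row_index column_index dir
              (c0 :: cs).length 1)
          -- stage 2: rays.count(list(word_to_find[1:]))
          ((rays.count (cs.map (fun ch => String.ofList [ch])) : Nat) : Int)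

-- ===== PRECONDITION & SPEC =====
-- Pre_ excludes the inputs where A or B may raise IndexError: an empty word, a start index out
-- of range, and — when the first cell matches a word of length ≥ 2 — declared dimensions that
-- overstate the actual grid (a walk/ray could then index a declared-in-bounds but missing
-- cell); this last conjunct is conservative: on over-declared grids whose walks all stop
-- before a missing cell A still returns (e.g. 0), and B may raise or return the same value.
def Pre_get_number_of_words_found_from_position (wordsearch_rows : List (List String)) (row_index : Int) (column_index : Int) (num_of_rows : Int) (num_of_columns : Int) (word_to_find : String) : Prop :=
  word_to_find.toList ≠ [] ∧
  PySem.Raise.InRange wordsearch_rows.length row_index ∧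
  PySem.Raise.InRange (PySem.List.pyGetD wordsearch_rows row_index []).length column_index ∧
  (word_to_find.toList.length = 1 ∨
   String.ofList [word_to_find.toList.headD ' '] ≠ pvCell wordsearch_rows row_index column_index ∨
   (num_of_rows ≤ (wordsearch_rows.length : Int) ∧
    ∀ row ∈ wordsearch_rows, num_of_columns ≤ (row.length : Int)))
instance (wordsearch_rows : List (List String)) (row_index : Int) (column_index : Int) (num_of_rows : Int) (num_of_columns : Int) (word_to_find : String) : Decidable (Pre_get_number_of_words_found_from_position wordsearch_rows row_index column_index num_of_rows num_of_columns word_to_find) := by unfold Pre_get_number_of_words_found_from_position; infer_instance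

def pvWitness_get_number_of_words_found_from_position : List (List String) × Int × Int × Int × Int × String :=
  ([["X", "M"], ["A", "S"]], 0, 0, 2, 2, "XMAS")

def Spec_get_number_of_words_found_from_position (wordsearch_rows : List (List String)) (row_index : Int) (column_index : Int) (num_of_rows : Int) (num_of_columns : Int) (word_to_find : String) (out : Int) : Prop := out = get_number_of_words_found_from_position_alt wordsearch_rows row_index column_index num_of_rows num_of_columns word_to_find
instance (wordsearch_rows : List (List String)) (row_index : Int) (column_index : Int) (num_of_rows : Int) (num_of_columns : Int) (word_to_find : String) (out : Int) : Decidable (Spec_get_number_of_words_found_from_position wordsearch_rows row_index column_index num_of_rows num_of_columns word_to_find out) := by unfold Spec_get_number_of_words_found_from_position; infer_instance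

-- ===== CLAIM (what is proved, stated in full; the proofs are below) =====
def Claim_equal_get_number_of_words_found_from_position : Prop := ∀ (wordsearch_rows : List (List String)) (row_index : Int) (column_index : Int) (num_of_rows : Int) (num_of_columns : Int) (word_to_find : String), Dom_get_number_of_words_found_from_position wordsearch_rows row_index column_index num_of_rows num_of_columns word_to_find → Pre_get_number_of_words_found_from_position wordsearch_rows row_index column_index num_of_rows num_of_columns word_to_find → Spec_get_number_of_words_found_from_position wordsearch_rows row_index column_index num_of_rows num_of_columns word_to_find (get_number_of_words_found_from_position wordsearch_rows row_index column_index num_of_rows num_of_columns word_to_find)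

-- ===== LEMMAS AND PROOFS =====

-- A's walk from count = k at the position k-1 steps along dir reaches the word length iff the
-- remaining ray (from index k) equals the remaining tail of the word, cell for cell.
lemma pvWalkA_iff_ray (rows : List (List String)) (nr nc : Int) (w : List Char) (dir : Int × Int)
    (r c : Int) :
    ∀ fuel k : Nat, k + fuel = w.length → 1 ≤ k →
      ((pvWalkA rows nr nc w dir k (c + dir.2 * ((k : Int) - 1)) (r + dir.1 * ((k : Int) - 1))
          = w.length) ↔
        pvRayB rows nr nc r c dir w.length k =
          (w.drop k).map (fun ch => String.ofList [ch])) := by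
  intro fuel
  induction fuel with
  | zero =>
    intro k hk _
    rw [pvWalkA, dif_neg (by omega : ¬ k < w.length),
      pvRayB, dif_neg (by omega : ¬ k < w.length)]
    simp [show k = w.length by omega]
  | succ n ih =>
    intro k hk hk1
    have hlt : k < w.length := by omega
    have e1 : r + dir.1 * ((k : Int) - 1) + dir.1 = r + dir.1 * (k : Int) := by ring
    have e2 : c + dir.2 * ((k : Int) - 1) + dir.2 = c + dir.2 * (k : Int) := by ring
    rw [pvWalkA, pvRayB]
    simp only [dif_pos hlt]
    rw [e1, e2]
    have hdrop : w.drop k = w[k] :: w.drop (k + 1) := List.drop_eq_getElem_cons hlt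
    by_cases hb : r + dir.1 * (k : Int) < 0 ∨ nr ≤ r + dir.1 * (k : Int) ∨
        c + dir.2 * (k : Int) < 0 ∨ nc ≤ c + dir.2 * (k : Int)
    · rw [if_pos hb, if_pos hb]
      constructor
      · intro h; exact absurd h (by omega)
      · intro h; rw [hdrop] at h; simp at h; omega
    · rw [if_neg hb, if_neg hb]
      by_cases hm : pvCell rows (r + dir.1 * (k : Int)) (c + dir.2 * (k : Int)) ≠
          String.ofList [w.getD k ' ']
      · rw [if_pos hm]
        constructor
        · intro h; exact absurd h (by omega)
        · intro h
          rw [hdrop] at h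
          simp only [List.map_cons, List.cons.injEq] at h
          exact absurd (by rw [h.1, List.getD_eq_getElem _ _ hlt]) hm
      · rw [if_neg hm]
        push Not at hm
        have ihk := ih (k + 1) (by omega) (by omega)
        have e3 : c + dir.2 * (((k + 1 : Nat) : Int) - 1) = c + dir.2 * (k : Int) := by
          push_cast; ring
        have e4 : r + dir.1 * (((k + 1 : Nat) : Int) - 1) = r + dir.1 * (k : Int) := by
          push_cast; ring
        rw [e3, e4] at ihk
        rw [ihk, hdrop]
        simp only [List.map_cons, List.cons.injEq]
        constructor
        · intro h; exact ⟨by rw [hm, List.getD_eq_getElem _ _ hlt], h⟩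
        · intro h
          exact h.2

-- A's counting fold equals the count of any pointwise-equivalent value among the mapped rays.
lemma pvFold_eq_countP {α : Type} (ds : List α) (p : α → Prop) [DecidablePred p] (q : α → Bool)
    (hpq : ∀ d, p d ↔ q d = true) :
    ∀ acc : Int, ds.foldl (fun acc d => if p d then acc + 1 else acc) acc =
      acc + ((ds.countP q : Nat) : Int) := by
  induction ds with
  | nil => intro acc; simp
  | cons d ds ih =>
    intro acc
    by_cases h : p d
    · simp only [List.foldl_cons, if_pos h, ih, List.countP_cons, (hpq d).mp h]
      push_cast; ring
    · have hq : q d = false := by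
        cases hqd : q d
        · rfl
        · exact absurd ((hpq d).mpr hqd) h
      simp only [List.foldl_cons, if_neg h, ih, List.countP_cons, hq]
      simp

-- ===== VERDICT (by name: the statement is the Claim_ definition above) =====
theorem get_number_of_words_found_from_position_spec : Claim_equal_get_number_of_words_found_from_position := by
  intro rows r c nr nc word _ _
  unfold Spec_get_number_of_words_found_from_position
  unfold get_number_of_words_found_from_position get_number_of_words_found_from_position_alt
  cases hw : word.toList with
  | nil => rfl
  | cons c0 cs =>
    cases hrow : PySem.List.pyGet? rows r with
    | none => rfl
    | some row =>
      change (match PySem.List.pyGet? row c with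
          | none => (0 : Int)
          | some cell =>
            if String.ofList [c0] ≠ cell then 0
            else
              pvDirs.foldl (fun acc dir =>
                if pvWalkA rows nr nc (c0 :: cs) dir 1 c r = (c0 :: cs).length
                then acc + 1 else acc) 0) =
        (match PySem.List.pyGet? row c with
          | none => (0 : Int)
          | some cell =>
            if String.ofList [c0] ≠ cell then 0
            else
              (((pvDirs.map (fun dir =>
                  pvRayB rows nr nc r c dir (c0 :: cs).length 1)).count
                  (cs.map (fun ch => String.ofList [ch])) : Nat) : Int))
      cases hcell : PySem.List.pyGet? row c with
      | none => rfl
      | some cell =>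
        change (if String.ofList [c0] ≠ cell then (0 : Int)
            else pvDirs.foldl (fun acc dir =>
              if pvWalkA rows nr nc (c0 :: cs) dir 1 c r = (c0 :: cs).length
              then acc + 1 else acc) 0) =
          (if String.ofList [c0] ≠ cell then (0 : Int)
            else (((pvDirs.map (fun dir =>
                pvRayB rows nr nc r c dir (c0 :: cs).length 1)).count
                (cs.map (fun ch => String.ofList [ch])) : Nat) : Int))
        by_cases hne : String.ofList [c0] ≠ cell
        · rw [if_pos hne, if_pos hne]
        · rw [if_neg hne, if_neg hne]
          have hwalk : ∀ dir, (pvWalkA rows nr nc (c0 :: cs) dir 1 c r = (c0 :: cs).length) ↔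
              (pvRayB rows nr nc r c dir (c0 :: cs).length 1 ==
                cs.map (fun ch => String.ofList [ch])) = true := by
            intro dir
            have h := pvWalkA_iff_ray rows nr nc (c0 :: cs) dir r c ((c0 :: cs).length - 1) 1
              (by simp only [List.length_cons]; omega) le_rfl
            simp only [beq_iff_eq]
            simpa using h
          have hmain := pvFold_eq_countP pvDirs
            (fun dir => pvWalkA rows nr nc (c0 :: cs) dir 1 c r = (c0 :: cs).length)
            (fun dir => pvRayB rows nr nc r c dir (c0 :: cs).length 1 ==
              cs.map (fun ch => String.ofList [ch]))
            hwalk 0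
          rw [List.count_eq_countP, List.countP_map]
          simpa [Function.comp] using hmain
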